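-- pv_equiv track=rewrite | github.com/autonomouse/Automated-bug-triaging | doberman/tests/common_test_methods.py | replace_x_plus
-- ===== SOURCE A (Python) =====
-- def replace_x_plus(text):
--     if '+' not in text:
--         return text
--     split_up = text.split('+')
--     for num in range(0, len(split_up)-1):
--         lastchar = split_up[num][-1]
--         repl_char = 'x' if lastchar is '.' else lastchar
--         text = text.replace(lastchar + '+', repl_char)
--     return text
-- ===== SOURCE B (Python) =====
-- def replace_x_plus(text):
--     out = []
--     for ch in text:
--         if ch == '+':
--             if out and out[-1] == '.':
--                 out[-1] = 'x'
--         else: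
--             out.append(ch)
--     return ''.join(out)
-- ===== Notes on version B (the rewrite author's own statement) =====
-- stated objective: simpler
-- what changed: A splits on '+' and then rescans the whole string with text.replace once per split piece; B makes a single left-to-right pass over the characters, dropping each '+' and turning a '.' immediately before it into 'x'.
import Mathlib
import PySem

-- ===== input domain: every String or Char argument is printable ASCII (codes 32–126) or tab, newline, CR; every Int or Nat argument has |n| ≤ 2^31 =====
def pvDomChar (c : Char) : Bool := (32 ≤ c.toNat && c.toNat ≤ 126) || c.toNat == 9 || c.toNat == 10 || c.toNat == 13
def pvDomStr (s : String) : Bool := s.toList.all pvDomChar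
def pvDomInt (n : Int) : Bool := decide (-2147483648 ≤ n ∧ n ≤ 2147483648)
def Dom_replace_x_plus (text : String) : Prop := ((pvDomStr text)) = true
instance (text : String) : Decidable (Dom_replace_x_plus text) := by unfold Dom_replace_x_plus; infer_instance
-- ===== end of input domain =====

-- B replaces A's split-then-repeated-full-string-replace with a single left-to-right
-- character scan (objective: simpler; one pass, no repeated str.replace rescans).

-- ===== PORT A =====
-- A-side helper: the body of A's for-loop ('lastchar = split_up[num][-1]; text = text.replace(...)').
-- 'lastchar is "."' : CPython interns 1-char strings, so it is equality there.
def pvInnerA (t piece : String) : String :=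
  match PySem.Str.pyGet? piece (-1) with
  | none => t          -- Python raises IndexError here (empty piece); excluded by Pre_
  | some lastchar =>
    let repl_char : String := if lastchar = '.' then "x" else String.ofList [lastchar]
    PySem.Str.replace t (String.ofList [lastchar, '+']) repl_char

def pvStepA (split_up : List String) (t : String) (num : Int) : String :=
  match PySem.List.pyGet? split_up num with
  | none => t          -- unreachable: 0 ≤ num < len(split_up) - 1
  | some piece => pvInnerA t piece

def replace_x_plus (text : String) : String :=
  if PySem.Str.isIn "+" text = false then text
  else
    match PySem.Str.split? text "+" with
    | none => text     -- unreachable: the separator "+" is nonempty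
    | some split_up =>
      (PySem.List.pyRange 0 ((split_up.length : Int) - 1)).foldl (pvStepA split_up) text

-- ===== PORT B =====
def replace_x_plus_alt (text : String) : String :=
  String.ofList (text.toList.foldl (fun out ch =>
    if ch = '+' then
      if PySem.List.pyGet? out (-1) = some '.' then PySem.List.pySetD out (-1) 'x' else out
    else out ++ [ch]) [])

-- ===== PRECONDITION & SPEC =====
-- Pre_ excludes exactly the inputs on which A raises IndexError: a '+' preceded by no
-- character (leading '+') or by another '+' ('++'), i.e. an empty split piece before the last.
def Pre_replace_x_plus (text : String) : Prop :=
  PySem.Str.startswith text "+" = false ∧ PySem.Str.isIn "++" text = false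
instance (text : String) : Decidable (Pre_replace_x_plus text) := by unfold Pre_replace_x_plus; infer_instance

def pvWitness_replace_x_plus : String := "a.+b+c"

def Spec_replace_x_plus (text : String) (out : String) : Prop := out = replace_x_plus_alt text
instance (text : String) (out : String) : Decidable (Spec_replace_x_plus text out) := by unfold Spec_replace_x_plus; infer_instance

-- ===== CLAIM (what is proved, stated in full; the proofs are below) =====
def Claim_equal_replace_x_plus : Prop := ∀ (text : String), Dom_replace_x_plus text → Pre_replace_x_plus text → Spec_replace_x_plus text (replace_x_plus text)

-- ===== LEMMAS AND PROOFS =====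

-- proof-side structural versions of Python's str.replace / str.split on char lists
def pvReplace2 (c : Char) (r : List Char) : List Char → List Char
  | [] => []
  | [a] => [a]
  | a :: b :: t =>
      if a = c ∧ b = '+' then r ++ pvReplace2 c r t else a :: pvReplace2 c r (b :: t)

def pvSplit : List Char → List (List Char)
  | [] => [[]]
  | c :: t =>
      if c = '+' then [] :: pvSplit t
      else match pvSplit t with
        | [] => [[c]]
        | h :: r => (c :: h) :: r

def pvUnsplit : List (List Char) → List Char
  | [] => []
  | [q] => q
  | p :: rest => p ++ '+' :: pvUnsplit rest

def pvLastC (p : List Char) : Char := p.getLastD ' '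
def pvRepl (c : Char) : List Char := if c = '.' then ['x'] else [c]
def pvConv (p : List Char) : List Char :=
  if p.getLast? = some '.' then p.dropLast ++ ['x'] else p

def pvWf (PS : List (List Char)) : Prop :=
  (∀ p ∈ PS, '+' ∉ p) ∧ ∀ p ∈ PS.dropLast, p ≠ []

-- A's intermediate text once the pieces whose last chars lie in D have been processed
def pvGlueU (D : List Char) : List (List Char) → List Char
  | [] => []
  | [q] => q
  | p :: rest => (if pvLastC p ∈ D then pvConv p else p ++ ['+']) ++ pvGlueU D rest

def pvGlueC : List (List Char) → List Char
  | [] => []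
  | [q] => q
  | p :: rest => pvConv p ++ pvGlueC rest

lemma pvUnsplit_cons₂ (p q : List Char) (rest : List (List Char)) :
    pvUnsplit (p :: q :: rest) = p ++ '+' :: pvUnsplit (q :: rest) := rfl

lemma pvGlueU_cons₂ (D : List Char) (p q : List Char) (rest : List (List Char)) :
    pvGlueU D (p :: q :: rest)
      = (if pvLastC p ∈ D then pvConv p else p ++ ['+']) ++ pvGlueU D (q :: rest) := rfl

lemma pvGlueC_cons₂ (p q : List Char) (rest : List (List Char)) :
    pvGlueC (p :: q :: rest) = pvConv p ++ pvGlueC (q :: rest) := rfl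

lemma pv_mem_dropLast_cons {α : Type} {p : α} {l : List α} (x : α)
    (h : p ∈ l.dropLast) : p ∈ (x :: l).dropLast := by
  cases l with
  | nil => simp at h
  | cons y ys => rw [List.dropLast_cons₂]; exact List.mem_cons_of_mem _ h

lemma pvReplace_go (c : Char) (r : List Char) :
    ∀ fuel l acc, l.length ≤ fuel →
      PySem.Chars.replace.go [c,'+'] r fuel l acc = acc.reverse ++ pvReplace2 c r l := by
  intro fuel
  induction fuel with
  | zero =>
    intro l acc h
    have : l = [] := by simpa using h
    subst this
    simp [PySem.Chars.replace.go, pvReplace2]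
  | succ n ih =>
    intro l acc h
    match l with
    | [] => simp [PySem.Chars.replace.go, pvReplace2]
    | [a] =>
      rw [PySem.Chars.replace.go]
      have hpre : ([c,'+']).isPrefixOf [a] = false := by simp [List.isPrefixOf]
      rw [hpre]
      simp only [if_false, Bool.false_eq_true]
      rw [ih [] (a :: acc) (by simp)]
      simp [pvReplace2]
    | a :: b :: t =>
      rw [PySem.Chars.replace.go]
      by_cases hp : a = c ∧ b = '+'
      · have hpre : ([c,'+']).isPrefixOf (a :: b :: t) = true := by
          simp [List.isPrefixOf, hp.1, hp.2]
        rw [hpre]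
        simp only [if_true]
        rw [show List.drop ([c,'+']).length (a :: b :: t) = t by simp]
        rw [ih t (r.reverse ++ acc) (by simp at h ⊢; omega)]
        simp [pvReplace2, hp]
      · have hpre : ([c,'+']).isPrefixOf (a :: b :: t) = false := by
          simp [List.isPrefixOf]
          intro hc hb
          subst hc; subst hb
          exact hp ⟨rfl, rfl⟩
        rw [hpre]
        simp only [if_false, Bool.false_eq_true]
        rw [ih (b :: t) (a :: acc) (by simp at h ⊢; omega)]
        simp [pvReplace2, hp]

lemma pvReplace_eq (c : Char) (r s : List Char) :
    PySem.Chars.replace s [c, '+'] r = pvReplace2 c r s := by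
  rw [PySem.Chars.replace]
  simp only [List.isEmpty_cons, if_false, Bool.false_eq_true]
  exact pvReplace_go c r s.length s [] le_rfl

lemma pvSplit_ne_nil (s : List Char) : pvSplit s ≠ [] := by
  cases s with
  | nil => simp [pvSplit]
  | cons c t =>
    rw [pvSplit]
    split
    · simp
    · split <;> simp

lemma pvSplit_cons (s : List Char) : pvSplit s = (pvSplit s).headI :: (pvSplit s).tail := by
  cases h : pvSplit s with
  | nil => exact absurd h (pvSplit_ne_nil s)
  | cons a r => simp

lemma pvSplit_go :
    ∀ fuel l cur acc, l.length ≤ fuel →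
      PySem.Chars.splitOn.go ['+'] fuel l cur acc
        = acc.reverse ++ (cur.reverse ++ (pvSplit l).headI) :: (pvSplit l).tail := by
  intro fuel
  induction fuel with
  | zero =>
    intro l cur acc h
    have : l = [] := by simpa using h
    subst this
    simp [PySem.Chars.splitOn.go, pvSplit]
  | succ n ih =>
    intro l cur acc h
    match l with
    | [] => simp [PySem.Chars.splitOn.go, pvSplit]
    | c :: rest =>
      rw [PySem.Chars.splitOn.go]
      by_cases hc : c = '+'
      · subst hc
        have hpre : (['+']).isPrefixOf ('+' :: rest) = true := by simp [List.isPrefixOf]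
        rw [hpre]
        simp only [if_true]
        rw [show List.drop (['+']).length ('+' :: rest) = rest by simp]
        rw [ih rest [] (cur.reverse :: acc) (by simp at h ⊢; omega)]
        rw [pvSplit]
        rw [if_pos rfl]
        rw [pvSplit_cons rest]
        simp
      · have hpre : (['+']).isPrefixOf (c :: rest) = false := by
          simp [List.isPrefixOf]
          intro hx; exact absurd hx.symm hc
        rw [hpre]
        simp only [if_false, Bool.false_eq_true]
        rw [ih rest (c :: cur) acc (by simp at h ⊢; omega)]
        rw [pvSplit]
        rw [if_neg hc]
        rw [pvSplit_cons rest]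
        simp

lemma pvSplit_eq (s : List Char) : PySem.Chars.splitOn s ['+'] = pvSplit s := by
  rw [PySem.Chars.splitOn]
  rw [pvSplit_go (s.length + 1) s [] [] (by omega)]
  simp [← pvSplit_cons]

lemma pvUnsplit_pvSplit (s : List Char) : pvUnsplit (pvSplit s) = s := by
  induction s with
  | nil => simp [pvSplit, pvUnsplit]
  | cons c t ih =>
    rw [pvSplit]
    by_cases hc : c = '+'
    · subst hc
      rw [if_pos rfl]
      cases h : pvSplit t with
      | nil => exact absurd h (pvSplit_ne_nil t)
      | cons a r =>
        rw [pvUnsplit_cons₂, ← h, ih]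
        simp
    · rw [if_neg hc]
      cases h : pvSplit t with
      | nil => exact absurd h (pvSplit_ne_nil t)
      | cons a r =>
        cases r with
        | nil =>
          rw [h] at ih
          simp [pvUnsplit] at ih ⊢
          simp [ih]
        | cons r1 r2 =>
          rw [h] at ih
          rw [pvUnsplit_cons₂] at ih
          rw [pvUnsplit_cons₂]
          simp at ih ⊢
          simp [ih]

lemma pvSplit_pfree (s : List Char) : ∀ p ∈ pvSplit s, '+' ∉ p := by
  induction s with
  | nil => simp [pvSplit]
  | cons c t ih =>
    rw [pvSplit]
    by_cases hc : c = '+'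
    · subst hc
      rw [if_pos rfl]
      intro p hp
      rcases List.mem_cons.mp hp with h | h
      · simp [h]
      · exact ih p h
    · rw [if_neg hc]
      cases h : pvSplit t with
      | nil => exact absurd h (pvSplit_ne_nil t)
      | cons a r =>
        intro p hp
        rcases List.mem_cons.mp hp with h2 | h2
        · subst h2
          have ha : '+' ∉ a := ih a (by rw [h]; exact List.mem_cons_self)
          intro hmem
          rcases List.mem_cons.mp hmem with h3 | h3
          · exact hc h3.symm
          · exact ha h3
        · exact ih p (by rw [h]; exact List.mem_cons_of_mem _ h2)

lemma pvSplit_nonempty' :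
    ∀ (n : Nat) (s : List Char), s.length ≤ n → ¬ (['+','+'] <:+: s) → s.head? ≠ some '+' →
      ∀ p ∈ (pvSplit s).dropLast, p ≠ [] := by
  intro n
  induction n with
  | zero =>
    intro s hlen _ _
    have : s = [] := by simpa using hlen
    subst this
    simp [pvSplit]
  | succ m ih =>
    intro s hlen h2 h1
    match s with
    | [] => simp [pvSplit]
    | c :: t =>
      have hc : c ≠ '+' := by simpa using h1
      rw [pvSplit, if_neg hc]
      cases h : pvSplit t with
      | nil => exact absurd h (pvSplit_ne_nil t)
      | cons a r =>
        have htail : ∀ p ∈ (pvSplit t).tail.dropLast, p ≠ [] := by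
          match t with
          | [] => simp [pvSplit]
          | e :: u =>
            by_cases he : e = '+'
            · subst he
              rw [pvSplit, if_pos rfl]
              simp only [List.tail_cons]
              apply ih u (by simp at hlen ⊢; omega)
              · intro hinf
                exact h2 (hinf.trans ⟨[c, '+'], [], by simp⟩ )
              · intro hu
                apply h2
                cases u with
                | nil => simp at hu
                | cons x v =>
                  have hx : x = '+' := by simpa using hu
                  subst hx
                  exact ⟨[c], v, by simp⟩
            · rw [pvSplit, if_neg he]
              cases h3 : pvSplit u with
              | nil => exact absurd h3 (pvSplit_ne_nil u)
              | cons b r2 =>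
                simp only [List.tail_cons]
                intro p hp
                have := ih (e :: u) (by simp at hlen ⊢; omega)
                  (by intro hinf; exact h2 (hinf.trans ⟨[c], [], by simp⟩))
                  (by simpa using he)
                apply this
                rw [pvSplit, if_neg he, h3]
                exact pv_mem_dropLast_cons _ hp
        rw [h] at htail
        simp only [List.tail_cons] at htail
        cases r with
        | nil => simp
        | cons r1 r2 =>
          intro p hp
          rw [List.dropLast_cons₂] at hp
          rcases List.mem_cons.mp hp with h4 | h4
          · subst h4; simp
          · exact htail p h4

lemma pvReplace2_noop (c : Char) (r l : List Char) (h : '+' ∉ l) : pvReplace2 c r l = l := by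
  induction l with
  | nil => simp [pvReplace2]
  | cons a t ih =>
    cases t with
    | nil => simp [pvReplace2]
    | cons b t2 =>
      rw [pvReplace2]
      rw [if_neg (by
        rintro ⟨-, hb⟩
        exact h (by simp [hb]))]
      rw [ih (by intro hm; exact h (List.mem_cons_of_mem _ hm))]

lemma pvReplace2_skip (c : Char) (r : List Char) :
    ∀ (a l : List Char), '+' ∉ a → l.head? ≠ some '+' →
      pvReplace2 c r (a ++ l) = a ++ pvReplace2 c r l := by
  intro a
  induction a with
  | nil => simp
  | cons x a' ih =>
    intro l ha hl
    have hx : x ≠ '+' := fun h => ha (by simp [h])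
    have ha' : '+' ∉ a' := fun h => ha (List.mem_cons_of_mem _ h)
    cases h2 : a' ++ l with
    | nil =>
      rcases List.append_eq_nil_iff.mp h2 with ⟨h3, h4⟩
      subst h3; subst h4
      simp [pvReplace2]
    | cons b t =>
      have hb : b ≠ '+' := by
        intro hb'
        subst hb'
        cases a' with
        | nil =>
          simp at h2
          exact hl (by rw [h2]; rfl)
        | cons y a'' =>
          simp at h2
          exact ha' (by simp [h2.1])
      rw [show (x :: a') ++ l = x :: (a' ++ l) by simp, h2, pvReplace2]
      rw [if_neg (by rintro ⟨-, hb'⟩; exact hb hb')]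
      rw [← h2, ih l ha' hl]
      simp

lemma pvReplace2_plus (c : Char) (r : List Char) (hc : c ≠ '+') (l : List Char) :
    pvReplace2 c r ('+' :: l) = '+' :: pvReplace2 c r l := by
  cases l with
  | nil => simp [pvReplace2]
  | cons b t =>
    rw [pvReplace2]
    rw [if_neg (by rintro ⟨h1, -⟩; exact hc h1.symm)]

lemma pvReplace2_match (c : Char) (r : List Char) (hc : c ≠ '+') (p l : List Char)
    (hp : '+' ∉ p) (hlast : p.getLast? = some c) :
    pvReplace2 c r (p ++ '+' :: l) = p.dropLast ++ r ++ pvReplace2 c r l := by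
  have hne : p ≠ [] := by rintro rfl; simp at hlast
  have hdecomp : p = p.dropLast ++ [c] := by
    conv_lhs => rw [← List.dropLast_append_getLast hne]
    rw [List.getLast_eq_iff_getLast?_eq_some hne |>.mpr hlast]
  rw [hdecomp]
  rw [show (p.dropLast ++ [c]) ++ '+' :: l = p.dropLast ++ (c :: '+' :: l) by simp]
  rw [pvReplace2_skip c r p.dropLast _ (by
      intro hm
      exact hp (List.mem_of_mem_dropLast hm)) (by simp [hc])]
  rw [pvReplace2]
  rw [if_pos ⟨rfl, rfl⟩]
  simp

lemma pvReplace2_nomatch (c : Char) (r : List Char) (hc : c ≠ '+') (p l : List Char)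
    (hp : '+' ∉ p) (hlast : p.getLast? ≠ some c) :
    pvReplace2 c r (p ++ '+' :: l) = p ++ '+' :: pvReplace2 c r l := by
  induction p with
  | nil => simpa using pvReplace2_plus c r hc l
  | cons x p' ih =>
    have hx : x ≠ '+' := fun h => hp (by simp [h])
    have hp' : '+' ∉ p' := fun h => hp (List.mem_cons_of_mem _ h)
    cases p' with
    | nil =>
      have hxc : x ≠ c := by
        intro h; exact hlast (by simp [h])
      rw [show ([x] ++ '+' :: l) = x :: '+' :: l by simp, pvReplace2]
      rw [if_neg (by rintro ⟨h1, -⟩; exact hxc h1)]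
      rw [pvReplace2_plus c r hc l]
      simp
    | cons y p'' =>
      have hlast' : (y :: p'').getLast? ≠ some c := by
        rwa [show (x :: y :: p'').getLast? = (y :: p'').getLast? by simp] at hlast
      have hy : y ≠ '+' := fun h => hp' (by simp [h])
      rw [show ((x :: y :: p'') ++ '+' :: l) = x :: y :: (p'' ++ '+' :: l) by simp]
      rw [pvReplace2]
      rw [if_neg (by rintro ⟨-, h2⟩; exact hy h2)]
      rw [show y :: (p'' ++ '+' :: l) = ((y :: p'') ++ '+' :: l) by simp]
      rw [ih hp' hlast']
      simp

lemma pvConv_ne_nil {p : List Char} (h : p ≠ []) : pvConv p ≠ [] := by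
  rw [pvConv]
  split
  · simp
  · exact h

lemma pvConv_pfree {p : List Char} (h : '+' ∉ p) : '+' ∉ pvConv p := by
  rw [pvConv]
  split
  · intro hm
    rcases List.mem_append.mp hm with h1 | h1
    · exact h (List.mem_of_mem_dropLast h1)
    · simp at h1
  · exact h

lemma pvConv_eq {p : List Char} {c : Char} (h : p.getLast? = some c) :
    pvConv p = p.dropLast ++ pvRepl c := by
  have hne : p ≠ [] := by rintro rfl; simp at h
  rw [pvConv, pvRepl]
  by_cases hc : c = '.'
  · subst hc
    rw [if_pos h, if_pos rfl]
  · rw [if_neg (by rw [h]; simp [hc]), if_neg hc]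
    conv_lhs => rw [← List.dropLast_append_getLast hne]
    rw [List.getLast_eq_iff_getLast?_eq_some hne |>.mpr h]

lemma pvWf_tail {p : List Char} {rest : List (List Char)} (h : pvWf (p :: rest)) : pvWf rest := by
  obtain ⟨h1, h2⟩ := h
  refine ⟨fun q hq => h1 q (List.mem_cons_of_mem _ hq), fun q hq => h2 q (pv_mem_dropLast_cons _ hq)⟩

lemma pvWf_head {p : List Char} {q : List Char} {rest : List (List Char)}
    (h : pvWf (p :: q :: rest)) : p ≠ [] ∧ '+' ∉ p := by
  exact ⟨h.2 p (by rw [List.dropLast_cons₂]; exact List.mem_cons_self),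
         h.1 p List.mem_cons_self⟩

lemma pvGlueU_headOk (D : List Char) (PS : List (List Char)) (h : pvWf PS) :
    (pvGlueU D PS).head? ≠ some '+' := by
  match PS with
  | [] => simp [pvGlueU]
  | [q] =>
    rw [pvGlueU]
    intro hh
    exact h.1 q List.mem_cons_self (List.mem_of_mem_head? hh)
  | p :: q :: rest =>
    obtain ⟨hne, hpf⟩ := pvWf_head h
    rw [pvGlueU_cons₂]
    intro hh
    split at hh
    · have h1 : (pvConv p).head? = some '+' := by
        rwa [List.head?_append_of_ne_nil _ (pvConv_ne_nil hne)] at hh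
      exact pvConv_pfree hpf (List.mem_of_mem_head? h1)
    · have h1 : (p ++ ['+'] ++ pvGlueU D (q :: rest)).head? = some '+' := by
        simpa using hh
      rw [List.append_assoc, List.head?_append_of_ne_nil _ hne] at h1
      exact hpf (List.mem_of_mem_head? h1)

lemma pvGlueU_step (c : Char) (hc : c ≠ '+') (D : List Char) :
    ∀ PS, pvWf PS → pvReplace2 c (pvRepl c) (pvGlueU D PS) = pvGlueU (D ++ [c]) PS := by
  intro PS
  match PS with
  | [] => intro _; simp [pvGlueU, pvReplace2]
  | [q] =>
    intro h
    rw [pvGlueU, pvGlueU]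
    exact pvReplace2_noop _ _ _ (h.1 q List.mem_cons_self)
  | p :: q :: rest =>
    intro h
    obtain ⟨hne, hpf⟩ := pvWf_head h
    have hrest := pvWf_tail h
    have hIH := pvGlueU_step c hc D (q :: rest) hrest
    rw [pvGlueU_cons₂, pvGlueU_cons₂]
    by_cases hD : pvLastC p ∈ D
    · rw [if_pos hD, if_pos (by simp [hD])]
      rw [pvReplace2_skip c (pvRepl c) (pvConv p) _ (pvConv_pfree hpf)
            (pvGlueU_headOk D (q :: rest) hrest)]
      rw [hIH]
    · rw [if_neg hD]
      have hlast : p.getLast? = some (pvLastC p) := by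
        rw [pvLastC]
        cases hp : p.getLast? with
        | none => exact absurd (List.getLast?_eq_none_iff.mp hp) hne
        | some a => simp [List.getLastD_eq_getLast?, hp]
      by_cases hcc : pvLastC p = c
      · rw [if_pos (by simp [hcc])]
        rw [show (p ++ ['+']) ++ pvGlueU D (q :: rest) = p ++ '+' :: pvGlueU D (q :: rest) by simp]
        rw [pvReplace2_match c (pvRepl c) hc p _ hpf (by rw [hlast, hcc])]
        rw [hIH]
        rw [pvConv_eq hlast, hcc]
      · rw [if_neg (by simp [hD, hcc])]
        rw [show (p ++ ['+']) ++ pvGlueU D (q :: rest) = p ++ '+' :: pvGlueU D (q :: rest) by simp]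
        rw [pvReplace2_nomatch c (pvRepl c) hc p _ hpf (by rw [hlast]; simp [hcc])]
        rw [hIH]
        simp

lemma pvGlueU_nil_done (PS : List (List Char)) : pvGlueU [] PS = pvUnsplit PS := by
  match PS with
  | [] => rfl
  | [q] => rfl
  | p :: q :: rest =>
    rw [pvGlueU_cons₂, pvUnsplit_cons₂, pvGlueU_nil_done (q :: rest)]
    simp

lemma pvGlueU_done (D : List Char) :
    ∀ PS, (∀ p ∈ PS.dropLast, pvLastC p ∈ D) → pvGlueU D PS = pvGlueC PS := by
  intro PS
  match PS with
  | [] => intro _; rfl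
  | [q] => intro _; rfl
  | p :: q :: rest =>
    intro h
    rw [pvGlueU_cons₂, pvGlueC_cons₂]
    rw [if_pos (h p (by rw [List.dropLast_cons₂]; exact List.mem_cons_self))]
    rw [pvGlueU_done D (q :: rest) (fun p hp => h p (pv_mem_dropLast_cons _ hp))]

lemma pvLastC_ne_plus {p : List Char} (hne : p ≠ []) (hpf : '+' ∉ p) : pvLastC p ≠ '+' := by
  intro h
  apply hpf
  rw [pvLastC, List.getLastD_eq_getLast?] at h
  cases hp : p.getLast? with
  | none => exact absurd (List.getLast?_eq_none_iff.mp hp) hne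
  | some a =>
    rw [hp] at h
    simp at h
    subst h
    exact List.mem_of_getLast? hp

lemma pvFoldA :
    ∀ (ps₂ : List (List Char)) (D : List Char) (PS : List (List Char)), pvWf PS →
      (∀ p ∈ ps₂, p ≠ [] ∧ '+' ∉ p) →
      ps₂.foldl (fun t p => pvReplace2 (pvLastC p) (pvRepl (pvLastC p)) t) (pvGlueU D PS)
        = pvGlueU (D ++ ps₂.map pvLastC) PS := by
  intro ps₂
  induction ps₂ with
  | nil => intro D PS _ _; simp
  | cons p ps ih =>
    intro D PS hwf hps
    obtain ⟨hne, hpf⟩ := hps p List.mem_cons_self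
    rw [List.foldl_cons]
    rw [pvGlueU_step (pvLastC p) (pvLastC_ne_plus hne hpf) D PS hwf]
    rw [ih (D ++ [pvLastC p]) PS hwf (fun q hq => hps q (List.mem_cons_of_mem _ hq))]
    simp

lemma pvAFold_main (PS : List (List Char)) (hwf : pvWf PS) :
    PS.dropLast.foldl (fun t p => pvReplace2 (pvLastC p) (pvRepl (pvLastC p)) t) (pvUnsplit PS)
      = pvGlueC PS := by
  rw [← pvGlueU_nil_done PS]
  rw [pvFoldA PS.dropLast [] PS hwf
      (fun p hp => ⟨hwf.2 p hp, hwf.1 p (List.mem_of_mem_dropLast hp)⟩)]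
  exact pvGlueU_done _ PS (fun p hp => by simpa using List.mem_map_of_mem (f := pvLastC) hp)

lemma pvSetD_last (l : List Char) (c : Char) (h : l ≠ []) :
    PySem.List.pySetD l (-1) c = l.dropLast ++ [c] := by
  have hl : 0 < l.length := List.length_pos_iff.2 h
  rw [PySem.List.pySetD, PySem.List.pySet?, PySem.List.pyIdx?]
  rw [if_neg (by omega), if_pos (by omega)]
  simp only [Option.map_some, Option.getD_some]
  rw [show (l.length - ((- (-1:Int)).toNat)) = l.length - 1 by omega]
  rw [List.set_eq_take_append_cons_drop, if_pos (by omega), List.dropLast_eq_take]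
  rw [List.drop_eq_nil_of_le (by omega)]

lemma pvScan_pfree (q : List Char) (h : '+' ∉ q) :
    ∀ acc, q.foldl (fun out ch =>
      if ch = '+' then
        if PySem.List.pyGet? out (-1) = some '.' then PySem.List.pySetD out (-1) 'x' else out
      else out ++ [ch]) acc = acc ++ q := by
  induction q with
  | nil => simp
  | cons c t ih =>
    intro acc
    have hc : c ≠ '+' := fun hx => h (by simp [hx])
    rw [List.foldl_cons, if_neg hc]
    rw [ih (fun hx => h (List.mem_cons_of_mem _ hx)) (acc ++ [c])]
    simp

lemma pvScan_junction (acc p : List Char) (hne : p ≠ []) :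
    (if PySem.List.pyGet? (acc ++ p) (-1) = some '.' then
        PySem.List.pySetD (acc ++ p) (-1) 'x' else acc ++ p) = acc ++ pvConv p := by
  rw [PySem.List.pyGet?_neg_one, List.getLast?_append_of_ne_nil _ hne]
  rw [pvConv]
  by_cases hd : p.getLast? = some '.'
  · rw [if_pos hd, if_pos hd]
    rw [pvSetD_last _ _ (by simp [hne])]
    rw [List.dropLast_append_of_ne_nil]
    · simp
    · exact hne
  · rw [if_neg hd, if_neg hd]

lemma pvScan_all :
    ∀ (PS : List (List Char)), pvWf PS → ∀ acc,
      (pvUnsplit PS).foldl (fun out ch =>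
        if ch = '+' then
          if PySem.List.pyGet? out (-1) = some '.' then PySem.List.pySetD out (-1) 'x' else out
        else out ++ [ch]) acc = acc ++ pvGlueC PS := by
  intro PS
  match PS with
  | [] => intro _ acc; simp [pvUnsplit, pvGlueC]
  | [q] =>
    intro h acc
    rw [pvUnsplit, pvGlueC]
    exact pvScan_pfree q (h.1 q List.mem_cons_self) acc
  | p :: q :: rest =>
    intro h acc
    obtain ⟨hne, hpf⟩ := pvWf_head h
    rw [pvUnsplit_cons₂, pvGlueC_cons₂]
    rw [List.foldl_append, pvScan_pfree p hpf acc, List.foldl_cons]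
    rw [if_pos rfl, pvScan_junction acc p hne]
    rw [pvScan_all (q :: rest) (pvWf_tail h) (acc ++ pvConv p)]
    simp

lemma pvFoldRange (SU : List String) :
    ∀ (m : Nat), m ≤ SU.length → ∀ t0 : String,
      (PySem.List.pyRange 0 (m : Int)).foldl (pvStepA SU) t0
        = (SU.take m).foldl pvInnerA t0 := by
  intro m
  induction m with
  | zero => intro _ t0; simp [PySem.List.pyRange]
  | succ n ih =>
    intro hm t0
    rw [show ((n + 1 : Nat) : Int) = (n : Int) + 1 by push_cast; ring]
    rw [PySem.List.pyRange_one_succ_right (by positivity)]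
    rw [List.foldl_append]
    rw [ih (by omega) t0]
    rw [List.foldl_cons, List.foldl_nil]
    rw [show pvStepA SU (List.foldl pvInnerA t0 (List.take n SU)) (n : Int)
          = pvInnerA (List.foldl pvInnerA t0 (List.take n SU)) SU[n] from by
      rw [pvStepA, PySem.List.pyGet?_natCast, List.getElem?_eq_getElem (by omega)]
      rfl]
    rw [List.take_add_one, List.getElem?_eq_getElem (by omega), Option.toList_some,
        List.foldl_concat]
    rfl

lemma pvStrStep (t piece : String) (hp : piece.toList ≠ []) :
    (pvInnerA t piece).toList
    = pvReplace2 (pvLastC piece.toList) (pvRepl (pvLastC piece.toList)) t.toList := by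
  have hget : PySem.Str.pyGet? piece (-1) = some (pvLastC piece.toList) := by
    have h1 : PySem.Str.pyGet? piece (-1) = PySem.List.pyGet? piece.toList (-1) := by
      simp [PySem.Str.pyGet?]
    rw [h1, PySem.List.pyGet?_neg_one]
    rw [pvLastC, List.getLastD_eq_getLast?]
    cases hg : piece.toList.getLast? with
    | none => exact absurd (List.getLast?_eq_none_iff.mp hg) hp
    | some a => simp
  rw [pvInnerA, hget]
  dsimp only
  rw [PySem.Str.toList_replace]
  rw [show (String.ofList [pvLastC piece.toList, '+']).toList = [pvLastC piece.toList, '+'] from by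
    simp]
  rw [pvReplace_eq]
  congr 1
  rw [pvRepl]
  by_cases hc : pvLastC piece.toList = '.'
  · rw [hc]; simp
  · rw [if_neg hc, if_neg hc]; simp

lemma pvStrFold (pcs : List String) (hne : ∀ p ∈ pcs, p.toList ≠ []) :
    ∀ t : String,
      (pcs.foldl pvInnerA t).toList
      = (pcs.map String.toList).foldl
          (fun t p => pvReplace2 (pvLastC p) (pvRepl (pvLastC p)) t) t.toList := by
  induction pcs with
  | nil => intro t; simp
  | cons p pcs ih =>
    intro t
    rw [List.foldl_cons, List.map_cons, List.foldl_cons]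
    rw [ih (fun q hq => hne q (List.mem_cons_of_mem _ hq))]
    rw [pvStrStep t p (hne p List.mem_cons_self)]

lemma pvAFold_main' (PS : List (List Char)) (hwf : pvWf PS) (u : List Char)
    (hu : u = pvUnsplit PS) :
    PS.dropLast.foldl (fun t p => pvReplace2 (pvLastC p) (pvRepl (pvLastC p)) t) u
      = pvGlueC PS := by
  rw [hu]; exact pvAFold_main PS hwf

lemma pvScan_all' (PS : List (List Char)) (hwf : pvWf PS) (u : List Char)
    (hu : u = pvUnsplit PS) :
    u.foldl (fun out ch =>
        if ch = '+' then
          if PySem.List.pyGet? out (-1) = some '.' then PySem.List.pySetD out (-1) 'x' else out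
        else out ++ [ch]) [] = pvGlueC PS := by
  rw [hu]; simpa using pvScan_all PS hwf []

lemma pv_main (text : String)
    (hstart : PySem.Str.startswith text "+" = false)
    (hpp : PySem.Str.isIn "++" text = false) :
    replace_x_plus text = replace_x_plus_alt text := by
  have hppc : ¬ (['+','+'] <:+: text.toList) := by
    intro hinf
    have h1 := (PySem.Str.isIn_iff_infix "++" text).mpr (by simpa using hinf)
    rw [hpp] at h1
    cases h1
  have hhead : text.toList.head? ≠ some '+' := by
    intro hh
    obtain ⟨t, ht⟩ := List.head?_eq_some_iff.mp hh
    have h1 : (["+".toList.head!] : List Char) <+: text.toList := by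
      rw [ht]
      exact ⟨t, by simp⟩
    have h2 := (PySem.Chars.startswith_iff text.toList ['+']).mpr (by simpa using h1)
    simp at hstart
    rw [hstart] at h2
    cases h2
  by_cases hplus : PySem.Str.isIn "+" text = false
  · rw [replace_x_plus, if_pos hplus, replace_x_plus_alt]
    have hmem : '+' ∉ text.toList := by
      intro hm
      have hinf : ("+" : String).toList <:+: text.toList := by
        obtain ⟨l1, l2, h⟩ := List.append_of_mem hm
        exact ⟨l1, l2, by simp [h]⟩
      have h1 := (PySem.Str.isIn_iff_infix "+" text).mpr hinf
      rw [hplus] at h1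
      cases h1
    rw [pvScan_pfree text.toList hmem []]
    simp
  · rw [replace_x_plus, if_neg hplus]
    have hwf : pvWf (pvSplit text.toList) :=
      ⟨pvSplit_pfree _, pvSplit_nonempty' text.toList.length text.toList le_rfl hppc hhead⟩
    have hsome : ∃ SU, PySem.Str.split? text "+" = some SU ∧
        SU.map String.toList = pvSplit text.toList := by
      have hbr := PySem.Str.split?_map text "+"
      rw [show PySem.Chars.split? text.toList ("+" : String).toList
            = some (pvSplit text.toList) from by
          rw [show ("+" : String).toList = ['+'] from by simp]
          rw [PySem.Chars.split?]
          rw [if_neg (by simp)]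
          rw [pvSplit_eq]] at hbr
      cases hsp : PySem.Str.split? text "+" with
      | none => rw [hsp] at hbr; simp at hbr
      | some SU =>
        rw [hsp] at hbr
        simp only [Option.map_some, Option.some_inj] at hbr
        exact ⟨SU, rfl, hbr⟩
    obtain ⟨SU, hSU, hmap⟩ := hsome
    rw [hSU]
    dsimp only
    have hSUlen : 1 ≤ SU.length := by
      by_contra hlen
      have : SU = [] := by
        cases SU with
        | nil => rfl
        | cons a b => simp at hlen
      subst this
      simp at hmap
      exact pvSplit_ne_nil text.toList hmap
    rw [show ((SU.length : Int) - 1) = ((SU.length - 1 : Nat) : Int) by omega]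
    rw [pvFoldRange SU (SU.length - 1) (by omega) text]
    rw [← List.dropLast_eq_take]
    apply String.toList_inj.mp
    rw [pvStrFold SU.dropLast (by
        intro p hp
        have hmem2 : p.toList ∈ (pvSplit text.toList).dropLast := by
          rw [← hmap, ← List.map_dropLast]
          exact List.mem_map_of_mem hp
        exact hwf.2 _ hmem2) text]
    rw [show SU.dropLast.map String.toList = (pvSplit text.toList).dropLast from by
      rw [← hmap, List.map_dropLast]]
    rw [pvAFold_main' (pvSplit text.toList) hwf text.toList (pvUnsplit_pvSplit _).symm]
    rw [replace_x_plus_alt]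
    simp only [String.toList_ofList]
    rw [pvScan_all' (pvSplit text.toList) hwf text.toList (pvUnsplit_pvSplit _).symm]

-- ===== VERDICT (by name: the statement is the Claim_ definition above) =====
theorem replace_x_plus_spec : Claim_equal_replace_x_plus := by
  intro text _ hpre
  unfold Spec_replace_x_plus
  exact pv_main text hpre.1 hpre.2
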